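-- pv_equiv track=rewrite | github.com/elisacio/CSI_project | zigzag_coloration.py | retriangulation
-- ===== SOURCE A (Python) =====
-- from math import floor
--
-- def draw_zigzag(patch):
--     """
--     Draw the zizag shape in a patch and color the new triangles.
--
--     Args:
--         patch (list(int)): list of vertices that form the patch.
--
--     Returns:
--         triangles_list: a list containing the lists of vertices that form the new triangles.
--         color_list: the list of the colors of the new triangles.
--     """
--     incr = 1
--     triangles_list = []
--     colors_list = []
--     # Boucle for sur le nombre de faces à créer
--     for i in range(len(patch)-2) :
--         # Coloration
--         color = 1 # Each triangle is encoded with the '1' bit except two faces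
--
--         # First triangle (encoded with the '0' bit)
--         if i == 0 :
--             v1 = patch[0]
--             v2 = patch[1]
--             v3 = patch[2]
--             color = 0
--
--         # Last triangle
--         elif i + 1 == len(patch)-2 :
--             v1 = patch[len(patch)-1]
--             v2 = patch[0]
--             v3 = patch[2]
--
--         # Triangles between triangle n° 1 and triangle n° nb_triangles/2
--         elif i < floor((len(patch)-2)/2) :
--             v1 = patch[i+1]
--             v2 = patch[i+2]
--             v3 = patch[len(patch)-i]
--
--         # Triangle nb_triangles/2 (encoded with the '0' bit)
--         elif i == floor((len(patch)-2)/2) :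
--             v1 = patch[i+1]
--             v2 = patch[i+2]
--             v3 = patch[i+3]
--             color = 0
--
--         # Triangles between triangle n° nb_triangles/2 and the last triangle
--         else :
--             v1 = patch[i+2]
--             v2 = patch[i+3]
--             # If the number of vertices of the patch is even
--             if len(patch) % 2 == 0 :
--                 v3 = patch[floor(len(patch)/2)-incr]
--             # If the number of vertices of the patch is odd
--             else :
--                 v3 = patch[floor(len(patch)/2)-incr+1]
--             incr += 1
--
--         # Creation of the new triangle
--         new_triangle = [v1,v2,v3]
--         triangles_list.append(new_triangle)
--         colors_list.append(color)
--
--     return triangles_list, colors_list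
--
-- def retriangulation(patches) :
--     """
--     Retriangulate and apply the coloration in all the patches.
--
--     Args:
--         patches list((list(int))): list of patches.
--
--     Returns:
--         retriangulated_patches: a list containing the list of vertices that form the new triangles for each patch.
--         patches_colors: the list of the triangles'colors of the patches.
--     """
--     retriangulated_patches = []
--     patches_colors = []
--     for patch in patches:
--         new_triangles, colors = draw_zigzag(patch)
--         retriangulated_patches.append(new_triangles)
--         patches_colors.append(colors)
--     return retriangulated_patches, patches_colors
-- ===== SOURCE B (Python) =====
-- def draw_zigzag(patch):
--     """Zigzag retriangulation: build the rising half with a two-pointer walk over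
--     vertex indices, then obtain the falling half by mirroring that walk; look the
--     vertex values up once at the end."""
--     n = len(patch)
--     if n < 3:
--         return [], []
--     rising = []
--     lo, hi = 2, n - 1
--     while hi - lo >= 3:
--         rising.append((lo, lo + 1, hi))
--         lo += 1
--         hi -= 1
--     idx = [(0, 1, 2)]
--     idx += rising
--     if n >= 5:
--         idx.append((lo, lo + 1, lo + 2))
--     kept = rising[:-1] if n % 2 == 0 else rising
--     for (a, b, c) in reversed(kept):
--         idx.append((c - 1, c, b))
--     if n >= 4:
--         idx.append((n - 1, 0, 2))
--     tris = [[patch[a], patch[b], patch[c]] for (a, b, c) in idx]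
--     cols = ([0] + [1] * len(rising) + ([0] if n >= 5 else [])
--             + [1] * len(kept) + ([1] if n >= 4 else []))
--     return tris, cols
--
--
-- def retriangulation(patches):
--     pairs = [draw_zigzag(p) for p in patches]
--     return [t for t, _ in pairs], [c for _, c in pairs]
-- ===== Notes on version B (the rewrite author's own statement) =====
-- stated objective: alternative
-- what changed: A computes every triangle independently inside one loop with five elif branches and a mutable incr counter; B instead runs a two-pointer walk (lo ascending, hi descending) that builds only the rising half as index triples, derives the falling half by reversing and mirroring that walk ((a,b,c) -> (c-1,c,b)), and resolves vertex values in one final lookup pass.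
import Mathlib
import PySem

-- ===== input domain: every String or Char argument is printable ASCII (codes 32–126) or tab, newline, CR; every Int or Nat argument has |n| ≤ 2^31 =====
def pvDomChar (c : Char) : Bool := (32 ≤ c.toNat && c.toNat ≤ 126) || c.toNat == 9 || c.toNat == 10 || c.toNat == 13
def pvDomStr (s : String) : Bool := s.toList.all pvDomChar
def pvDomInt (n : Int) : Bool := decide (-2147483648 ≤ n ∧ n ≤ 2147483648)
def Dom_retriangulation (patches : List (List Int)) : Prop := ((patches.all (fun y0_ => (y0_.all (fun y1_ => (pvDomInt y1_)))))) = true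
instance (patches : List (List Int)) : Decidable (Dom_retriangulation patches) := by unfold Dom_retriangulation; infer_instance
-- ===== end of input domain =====

-- B replaces A's single branchy loop (five elif cases, mutable incr counter) by a two-pointer
-- walk building the rising half as index triples, a mirror of that walk for the falling half,
-- and one final value-lookup pass; objective: alternative decomposition, same output.

-- indexing shorthand patch[j] (every index both programs form is in range, so the default 0 is never returned)
def zzG (patch : List Int) (j : Int) : Int := PySem.List.pyGetD patch j 0

-- ===== PORT A =====
-- loop body of draw_zigzag: state = (incr, triangles_list, colors_list)
def zzStep (patch : List Int) (st : Int × List (List Int) × List Int) (i : Int) :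
    Int × List (List Int) × List Int :=
  let n : Int := patch.length
  let incr := st.1
  let tris := st.2.1
  let cols := st.2.2
  if i = 0 then
    (incr, tris ++ [[zzG patch 0, zzG patch 1, zzG patch 2]], cols ++ [0])
  else if i + 1 = n - 2 then
    (incr, tris ++ [[zzG patch (n - 1), zzG patch 0, zzG patch 2]], cols ++ [1])
  else if i < PySem.Int.floordiv (n - 2) 2 then
    (incr, tris ++ [[zzG patch (i + 1), zzG patch (i + 2), zzG patch (n - i)]], cols ++ [1])
  else if i = PySem.Int.floordiv (n - 2) 2 then
    (incr, tris ++ [[zzG patch (i + 1), zzG patch (i + 2), zzG patch (i + 3)]], cols ++ [0])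
  else
    let v3 := if PySem.Int.mod n 2 = 0 then zzG patch (PySem.Int.floordiv n 2 - incr)
              else zzG patch (PySem.Int.floordiv n 2 - incr + 1)
    (incr + 1, tris ++ [[zzG patch (i + 2), zzG patch (i + 3), v3]], cols ++ [1])

def drawZigzag (patch : List Int) : List (List Int) × List Int :=
  ((PySem.List.pyRange 0 ((patch.length : Int) - 2) 1).foldl (zzStep patch) (1, [], [])).2

def retriangulation (patches : List (List Int)) : List (List (List Int)) × List (List Int) :=
  patches.foldl (fun acc patch =>
    let r := drawZigzag patch
    (acc.1 ++ [r.1], acc.2 ++ [r.2])) ([], [])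

-- ===== PORT B =====
-- the two-pointer while loop of Source B: returns (rising index triples, final lo)
def zzWalk (lo hi : Int) : List (Int × Int × Int) × Int :=
  if h : 3 ≤ hi - lo then
    let r := zzWalk (lo + 1) (hi - 1)
    ((lo, lo + 1, hi) :: r.1, r.2)
  else ([], lo)
termination_by (hi - lo).toNat
decreasing_by omega

def drawZigzagAlt (patch : List Int) : List (List Int) × List Int :=
  let n : Int := patch.length
  if n < 3 then ([], [])
  else
    let w := zzWalk 2 (n - 1)
    let rising := w.1
    let lo := w.2
    let kept := if PySem.Int.mod n 2 = 0 then rising.dropLast else rising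
    let idx := [((0 : Int), (1 : Int), (2 : Int))] ++ rising
      ++ (if 5 ≤ n then [(lo, lo + 1, lo + 2)] else [])
      ++ kept.reverse.map (fun t => (t.2.2 - 1, t.2.2, t.2.1))
      ++ (if 4 ≤ n then [(n - 1, (0 : Int), (2 : Int))] else [])
    (idx.map (fun t => [zzG patch t.1, zzG patch t.2.1, zzG patch t.2.2]),
     [(0 : Int)] ++ List.replicate rising.length 1
       ++ (if 5 ≤ n then [(0 : Int)] else [])
       ++ List.replicate kept.length 1
       ++ (if 4 ≤ n then [(1 : Int)] else []))

def retriangulation_alt (patches : List (List Int)) : List (List (List Int)) × List (List Int) :=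
  let pairs := patches.map drawZigzagAlt
  (pairs.map Prod.fst, pairs.map Prod.snd)

-- ===== PRECONDITION & SPEC =====
def Spec_retriangulation (patches : List (List Int)) (out : List (List (List Int)) × List (List Int)) : Prop := out = retriangulation_alt patches
instance (patches : List (List Int)) (out : List (List (List Int)) × List (List Int)) : Decidable (Spec_retriangulation patches out) := by unfold Spec_retriangulation; infer_instance

-- ===== CLAIM (what is proved, stated in full; the proofs are below) =====
def Claim_equal_retriangulation : Prop := ∀ (patches : List (List Int)), Dom_retriangulation patches → Spec_retriangulation patches (retriangulation patches)

-- ===== LEMMAS AND PROOFS =====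

-- the triangle/color emitted at loop index i, with A's incr replaced by its closed form i - h
def zzF (p : List Int) (i : Int) : List Int × Int :=
  let n : Int := p.length
  let h := PySem.Int.floordiv (n - 2) 2
  if i = 0 then ([zzG p 0, zzG p 1, zzG p 2], 0)
  else if i + 1 = n - 2 then ([zzG p (n - 1), zzG p 0, zzG p 2], 1)
  else if i < h then ([zzG p (i + 1), zzG p (i + 2), zzG p (n - i)], 1)
  else if i = h then ([zzG p (i + 1), zzG p (i + 2), zzG p (i + 3)], 0)
  else ([zzG p (i + 2), zzG p (i + 3),
         if PySem.Int.mod n 2 = 0 then zzG p (PySem.Int.floordiv n 2 - (i - h))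
         else zzG p (PySem.Int.floordiv n 2 - (i - h) + 1)], 1)

lemma zzStep_snd (p : List Int) (k : Int) (tris : List (List Int)) (cols : List Int) :
    (zzStep p (1 + max 0 (k - PySem.Int.floordiv ((p.length : Int) - 2) 2 - 1), tris, cols) k).2
      = (tris ++ [(zzF p k).1], cols ++ [(zzF p k).2]) := by
  simp only [zzStep, zzF, PySem.Int.floordiv_eq_ediv_of_pos (show (0:Int) < 2 by norm_num)]
  split_ifs with h1 h2 h3 h4 h5 <;>
    first
      | rfl
      | rw [show (1 : Int) + max 0 (k - ((p.length : Int) - 2) / 2 - 1)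
              = k - ((p.length : Int) - 2) / 2 from by omega]

lemma zzStep_fst (p : List Int) (k : Int) (tris : List (List Int)) (cols : List Int)
    (hk : k + 1 < (p.length : Int) - 2) :
    (zzStep p (1 + max 0 (k - PySem.Int.floordiv ((p.length : Int) - 2) 2 - 1), tris, cols) k).1
      = 1 + max 0 (k + 1 - PySem.Int.floordiv ((p.length : Int) - 2) 2 - 1) := by
  have hh : PySem.Int.floordiv ((p.length : Int) - 2) 2 = ((p.length : Int) - 2) / 2 :=
    PySem.Int.floordiv_eq_ediv_of_pos (by norm_num)
  simp only [zzStep, hh]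
  split_ifs with h1 h2 h3 h4 <;> omega

lemma loopA (p : List Int) : ∀ (fuel : Nat) (k : Int) (tris : List (List Int)) (cols : List Int),
    0 ≤ k → (((p.length : Int) - 2 - k).toNat ≤ fuel) →
    ((PySem.List.pyRange k ((p.length : Int) - 2) 1).foldl (zzStep p)
        (1 + max 0 (k - PySem.Int.floordiv ((p.length : Int) - 2) 2 - 1), tris, cols)).2
      = (tris ++ (PySem.List.pyRange k ((p.length : Int) - 2) 1).map (fun i => (zzF p i).1),
         cols ++ (PySem.List.pyRange k ((p.length : Int) - 2) 1).map (fun i => (zzF p i).2)) := by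
  intro fuel
  induction fuel with
  | zero =>
    intro k tris cols h0 hf
    rw [PySem.List.pyRange_one_eq_nil (by omega)]
    simp
  | succ fuel ih =>
    intro k tris cols h0 hf
    by_cases hk : k < (p.length : Int) - 2
    · rw [PySem.List.pyRange_one_cons hk]
      simp only [List.foldl_cons, List.map_cons]
      by_cases hlast : k + 1 < (p.length : Int) - 2
      · have hst : zzStep p (1 + max 0 (k - PySem.Int.floordiv ((p.length : Int) - 2) 2 - 1), tris, cols) k
            = (1 + max 0 (k + 1 - PySem.Int.floordiv ((p.length : Int) - 2) 2 - 1),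
               tris ++ [(zzF p k).1], cols ++ [(zzF p k).2]) := by
          have h1 := zzStep_fst p k tris cols hlast
          have h2 := zzStep_snd p k tris cols
          exact Prod.ext h1 h2
        rw [hst, ih (k + 1) _ _ (by omega) (by omega)]
        simp
      · have hend : (p.length : Int) - 2 = k + 1 := by omega
        rw [hend, PySem.List.pyRange_one_eq_nil (le_refl (k + 1))]
        simp only [List.foldl_nil, List.map_nil]
        have h2 := zzStep_snd p k tris cols
        rw [hend] at h2
        rw [h2]
    · rw [PySem.List.pyRange_one_eq_nil (by omega)]
      simp

lemma drawZigzag_eq (p : List Int) :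
    drawZigzag p
      = ((PySem.List.pyRange 0 ((p.length : Int) - 2) 1).map (fun i => (zzF p i).1),
         (PySem.List.pyRange 0 ((p.length : Int) - 2) 1).map (fun i => (zzF p i).2)) := by
  have hh : PySem.Int.floordiv ((p.length : Int) - 2) 2 = ((p.length : Int) - 2) / 2 :=
    PySem.Int.floordiv_eq_ediv_of_pos (by norm_num)
  have hn : (0 : Int) ≤ (p.length : Int) := Int.natCast_nonneg _
  have hinit : ((1 : Int), ([] : List (List Int)), ([] : List Int))
      = (1 + max 0 (0 - PySem.Int.floordiv ((p.length : Int) - 2) 2 - 1), [], []) := by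
    rw [hh]
    have h1 : max 0 (0 - ((p.length : Int) - 2) / 2 - 1) = 0 := by omega
    rw [h1]
    norm_num
  unfold drawZigzag
  rw [hinit, loopA p (((p.length : Int) - 2).toNat) 0 [] [] le_rfl (by omega)]
  simp

-- (range n).reverse as a map over range n
lemma zz_range_reverse (n : Nat) :
    (List.range n).reverse = (List.range n).map (fun k => n - 1 - k) := by
  apply List.ext_getElem
  · simp
  · intro i h1 h2
    simp [List.getElem_reverse]

-- closed form of the two-pointer walk
lemma zzWalk_spec : ∀ (fuel : Nat) (lo hi : Int), (hi - lo).toNat ≤ fuel →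
    zzWalk lo hi = ((List.range ((hi - lo - 1) / 2).toNat).map
        (fun (k : Nat) => ((lo + k : Int), (lo + k + 1 : Int), (hi - k : Int))),
      lo + (((hi - lo - 1) / 2).toNat : Int)) := by
  intro fuel
  induction fuel with
  | zero =>
    intro lo hi hf
    rw [zzWalk]
    rw [dif_neg (by omega)]
    have : ((hi - lo - 1) / 2).toNat = 0 := by omega
    simp [this]
  | succ fuel ih =>
    intro lo hi hf
    by_cases h3 : 3 ≤ hi - lo
    · rw [zzWalk, dif_pos h3, ih (lo + 1) (hi - 1) (by omega)]
      have hK : ((hi - lo - 1) / 2).toNat = ((hi - 1 - (lo + 1) - 1) / 2).toNat + 1 := by omega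
      rw [hK, List.range_succ_eq_map]
      simp only [List.map_cons, List.map_map]
      refine Prod.ext ?_ (by push_cast; ring)
      simp only [Nat.cast_zero, add_zero, sub_zero]
      congr 1
      apply List.map_congr_left
      intro k _
      simp only [Function.comp_apply]
      push_cast
      exact Prod.ext (by ring) (Prod.ext (by ring) (by ring))
    · rw [zzWalk, dif_neg h3]
      have : ((hi - lo - 1) / 2).toNat = 0 := by omega
      simp [this]

lemma drawZigzagAlt_eq (p : List Int) :
    drawZigzagAlt p
      = ((PySem.List.pyRange 0 ((p.length : Int) - 2) 1).map (fun i => (zzF p i).1),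
         (PySem.List.pyRange 0 ((p.length : Int) - 2) 1).map (fun i => (zzF p i).2)) := by
  have hh : PySem.Int.floordiv ((p.length : Int) - 2) 2 = ((p.length : Int) - 2) / 2 :=
    PySem.Int.floordiv_eq_ediv_of_pos (by norm_num)
  have hmod : PySem.Int.mod (p.length : Int) 2 = (p.length : Int) % 2 :=
    PySem.Int.mod_eq_emod_of_pos (by norm_num)
  have hn : (0 : Int) ≤ (p.length : Int) := Int.natCast_nonneg _
  have hw := zzWalk_spec ((p.length : Int) - 1 - 2).toNat 2 ((p.length : Int) - 1) le_rfl
  have tri_eq : ∀ a1 a2 a3 b1 b2 b3 : Int, a1 = b1 → a2 = b2 → a3 = b3 →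
      ([zzG p a1, zzG p a2, zzG p a3] : List Int) = [zzG p b1, zzG p b2, zzG p b3] := by
    intro a1 a2 a3 b1 b2 b3 h1 h2 h3
    rw [h1, h2, h3]
  by_cases h3 : (p.length : Int) < 3
  · unfold drawZigzagAlt
    rw [if_pos h3, PySem.List.pyRange_one_eq_nil (by omega)]
    simp
  · have h5or : (p.length : Int) = 3 ∨ (p.length : Int) = 4 ∨ 5 ≤ (p.length : Int) := by omega
    rcases h5or with hn3 | hn4 | hn5
    · -- n = 3
      have hK : (((p.length : Int) - 1 - 2 - 1) / 2).toNat = 0 := by omega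
      rw [hK] at hw
      unfold drawZigzagAlt
      rw [if_neg h3, hw]
      norm_num [hn3, zzF,
        show PySem.Int.mod 3 2 = 1 from by decide,
        show PySem.Int.floordiv 1 2 = 0 from by decide,
        show PySem.List.pyRange 0 1 1 = [0] from by decide]
    · -- n = 4
      have hK : (((p.length : Int) - 1 - 2 - 1) / 2).toNat = 0 := by omega
      rw [hK] at hw
      unfold drawZigzagAlt
      rw [if_neg h3, hw]
      norm_num [hn4, zzF,
        show PySem.Int.mod 4 2 = 0 from by decide,
        show PySem.Int.floordiv 2 2 = 1 from by decide,
        show PySem.List.pyRange 0 2 1 = [0, 1] from by decide]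
    · -- n ≥ 5
      have hh2 : PySem.Int.floordiv (p.length : Int) 2 = (p.length : Int) / 2 :=
        PySem.Int.floordiv_eq_ediv_of_pos (by norm_num)
      rw [show ((((p.length : Int)) - 1 - 2 - 1) / 2).toNat
            = ((((p.length : Int)) - 2) / 2 - 1).toNat from by omega] at hw
      -- the kept prefix of the rising walk, as one range map
      have hkept : (if PySem.Int.mod (p.length : Int) 2 = 0 then
            ((List.range ((((p.length : Int)) - 2) / 2 - 1).toNat).map
              (fun k : Nat => ((2 + k : Int), (2 + k + 1 : Int), ((p.length : Int) - 1 - k : Int)))).dropLast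
          else
            (List.range ((((p.length : Int)) - 2) / 2 - 1).toNat).map
              (fun k : Nat => ((2 + k : Int), (2 + k + 1 : Int), ((p.length : Int) - 1 - k : Int))))
          = (List.range (((p.length : Int) - ((p.length : Int) - 2) / 2 - 4).toNat)).map
              (fun k : Nat => ((2 + k : Int), (2 + k + 1 : Int), ((p.length : Int) - 1 - k : Int))) := by
        by_cases hpar : PySem.Int.mod (p.length : Int) 2 = 0
        · rw [if_pos hpar]
          rw [hmod] at hpar
          rw [show ((((p.length : Int)) - 2) / 2 - 1).toNat
                = (((p.length : Int) - ((p.length : Int) - 2) / 2 - 4).toNat) + 1 from by omega,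
              List.range_succ]
          simp
        · rw [if_neg hpar]
          rw [hmod] at hpar
          rw [show ((((p.length : Int)) - 2) / 2 - 1).toNat
                = (((p.length : Int) - ((p.length : Int) - 2) / 2 - 4).toNat) from by omega]
      have hsplit : PySem.List.pyRange 0 ((p.length : Int) - 2) 1
          = [0] ++ PySem.List.pyRange 1 (((p.length : Int) - 2) / 2) 1
            ++ [((p.length : Int) - 2) / 2]
            ++ PySem.List.pyRange (((p.length : Int) - 2) / 2 + 1) ((p.length : Int) - 3) 1
            ++ [(p.length : Int) - 3] := by
        rw [PySem.List.pyRange_one_append 0 1 ((p.length : Int) - 2) (by norm_num) (by omega),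
            PySem.List.pyRange_one_append 1 (((p.length : Int) - 2) / 2) ((p.length : Int) - 2)
              (by omega) (by omega),
            PySem.List.pyRange_one_append (((p.length : Int) - 2) / 2)
              (((p.length : Int) - 2) / 2 + 1) ((p.length : Int) - 2) (by omega) (by omega),
            PySem.List.pyRange_one_append (((p.length : Int) - 2) / 2 + 1)
              ((p.length : Int) - 3) ((p.length : Int) - 2) (by omega) (by omega),
            PySem.List.pyRange_one_singleton,
            show ((p.length : Int) - 2) = ((p.length : Int) - 3) + 1 from by ring,
            PySem.List.pyRange_one_singleton,
            show PySem.List.pyRange 0 1 = [0] from by decide]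
        simp
      have hr1 : PySem.List.pyRange 1 (((p.length : Int) - 2) / 2) 1
          = (List.range ((((p.length : Int) - 2) / 2 - 1)).toNat).map (fun k : Nat => (1 : Int) + k) :=
        PySem.List.pyRange_one 1 _
      have hr2 : PySem.List.pyRange (((p.length : Int) - 2) / 2 + 1) ((p.length : Int) - 3) 1
          = (List.range (((p.length : Int) - ((p.length : Int) - 2) / 2 - 4)).toNat).map
              (fun k : Nat => ((p.length : Int) - 2) / 2 + 1 + k) := by
        rw [PySem.List.pyRange_one (((p.length : Int) - 2) / 2 + 1) ((p.length : Int) - 3),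
            show (((p.length : Int) - 3) - (((p.length : Int) - 2) / 2 + 1)).toNat
              = (((p.length : Int) - ((p.length : Int) - 2) / 2 - 4)).toNat from by omega]
      unfold drawZigzagAlt
      rw [if_neg h3, hw]
      simp only []
      rw [hkept]
      rw [if_pos hn5, if_pos (show (4 : Int) ≤ (p.length : Int) from by omega)]
      rw [hsplit, hr1, hr2, ← List.map_reverse, zz_range_reverse]
      simp only [List.map_append, List.map_cons, List.map_nil, List.map_map,
        List.length_map, List.length_range, List.append_assoc, List.cons_append,
        List.nil_append]
      -- closed forms of zzF on each segment
      have e0 : zzF p 0 = ([zzG p 0, zzG p 1, zzG p 2], 0) := by simp [zzF]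
      have emid : zzF p (((p.length : Int) - 2) / 2)
          = ([zzG p (2 + (((((p.length : Int)) - 2) / 2 - 1).toNat : Int)),
              zzG p (2 + (((((p.length : Int)) - 2) / 2 - 1).toNat : Int) + 1),
              zzG p (2 + (((((p.length : Int)) - 2) / 2 - 1).toNat : Int) + 2)], 0) := by
        simp only [zzF, hh, if_true]
        split_ifs <;>
          first
            | (exfalso; omega)
            | (exact congrArg₂ Prod.mk
                (tri_eq _ _ _ _ _ _ (by omega) (by omega) (by omega)) rfl)
      have elast : zzF p ((p.length : Int) - 3)
          = ([zzG p ((p.length : Int) - 1), zzG p 0, zzG p 2], 1) := by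
        simp only [zzF, hh, hh2, hmod]
        split_ifs <;>
          first
            | rfl
            | (exfalso; omega)
      have erise : ∀ k : Nat, k < ((((p.length : Int)) - 2) / 2 - 1).toNat →
          zzF p (1 + (k : Int))
            = ([zzG p (2 + (k : Int)), zzG p (2 + (k : Int) + 1),
                zzG p ((p.length : Int) - 1 - (k : Int))], 1) := by
        intro k hk
        simp only [zzF, hh]
        split_ifs <;>
          first
            | (exfalso; omega)
            | (exact congrArg₂ Prod.mk
                (tri_eq _ _ _ _ _ _ (by omega) (by omega) (by omega)) rfl)
      have efall : ∀ t : Nat, t < ((p.length : Int) - ((p.length : Int) - 2) / 2 - 4).toNat →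
          zzF p (((p.length : Int) - 2) / 2 + 1 + (t : Int))
            = ([zzG p ((p.length : Int) - 1
                  - ((((p.length : Int) - ((p.length : Int) - 2) / 2 - 4).toNat - 1 - t : Nat) : Int) - 1),
                zzG p ((p.length : Int) - 1
                  - ((((p.length : Int) - ((p.length : Int) - 2) / 2 - 4).toNat - 1 - t : Nat) : Int)),
                zzG p (2 + ((((p.length : Int) - ((p.length : Int) - 2) / 2 - 4).toNat - 1 - t : Nat) : Int) + 1)],
               1) := by
        intro t ht
        simp only [zzF, hh, hh2, hmod]
        split_ifs <;>
          first
            | (exfalso; omega)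
            | (exact congrArg₂ Prod.mk
                (tri_eq _ _ _ _ _ _ (by omega) (by omega) (by omega)) rfl)
      have hriseT : List.map ((fun i => (zzF p i).1) ∘ fun k : Nat => (1 : Int) + k)
            (List.range ((((p.length : Int)) - 2) / 2 - 1).toNat)
          = List.map ((fun t : Int × Int × Int => [zzG p t.1, zzG p t.2.1, zzG p t.2.2]) ∘
              fun k : Nat => ((2 + k : Int), (2 + k + 1 : Int), ((p.length : Int) - 1 - k : Int)))
            (List.range ((((p.length : Int)) - 2) / 2 - 1).toNat) := by
        apply List.map_congr_left
        intro k hk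
        rw [List.mem_range] at hk
        simp only [Function.comp_apply]
        rw [erise k hk]
      have hriseC : List.map ((fun i => (zzF p i).2) ∘ fun k : Nat => (1 : Int) + k)
            (List.range ((((p.length : Int)) - 2) / 2 - 1).toNat)
          = List.map (fun _ : Nat => (1 : Int))
            (List.range ((((p.length : Int)) - 2) / 2 - 1).toNat) := by
        apply List.map_congr_left
        intro k hk
        rw [List.mem_range] at hk
        simp only [Function.comp_apply]
        rw [erise k hk]
      have hfallT : List.map ((fun i => (zzF p i).1) ∘ fun k : Nat => ((p.length : Int) - 2) / 2 + 1 + k)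
            (List.range ((p.length : Int) - ((p.length : Int) - 2) / 2 - 4).toNat)
          = List.map ((fun t : Int × Int × Int => [zzG p t.1, zzG p t.2.1, zzG p t.2.2]) ∘
              (fun t : Int × Int × Int => (t.2.2 - 1, t.2.2, t.2.1)) ∘
              (fun k : Nat => ((2 + k : Int), (2 + k + 1 : Int), ((p.length : Int) - 1 - k : Int))) ∘
              fun t : Nat => ((p.length : Int) - ((p.length : Int) - 2) / 2 - 4).toNat - 1 - t)
            (List.range ((p.length : Int) - ((p.length : Int) - 2) / 2 - 4).toNat) := by
        apply List.map_congr_left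
        intro t ht
        rw [List.mem_range] at ht
        simp only [Function.comp_apply]
        rw [efall t ht]
      have hfallC : List.map ((fun i => (zzF p i).2) ∘ fun k : Nat => ((p.length : Int) - 2) / 2 + 1 + k)
            (List.range ((p.length : Int) - ((p.length : Int) - 2) / 2 - 4).toNat)
          = List.map (fun _ : Nat => (1 : Int))
            (List.range ((p.length : Int) - ((p.length : Int) - 2) / 2 - 4).toNat) := by
        apply List.map_congr_left
        intro t ht
        rw [List.mem_range] at ht
        simp only [Function.comp_apply]
        rw [efall t ht]
      refine Prod.ext ?_ ?_
      · -- triangles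
        simp only [hriseT, hfallT]
        rw [e0, emid, elast]
      · -- colors
        simp only [hriseC, hfallC, List.map_const', List.length_range]
        rw [e0, emid, elast, if_pos hn5,
          if_pos (show (4 : Int) ≤ (p.length : Int) from by omega)]
        rfl

lemma drawZigzag_eq_alt (p : List Int) : drawZigzag p = drawZigzagAlt p :=
  (drawZigzag_eq p).trans (drawZigzagAlt_eq p).symm

lemma retri_loop (ps : List (List Int)) : ∀ (acc1 : List (List (List Int))) (acc2 : List (List Int)),
    ps.foldl (fun acc patch =>
        let r := drawZigzag patch
        (acc.1 ++ [r.1], acc.2 ++ [r.2])) (acc1, acc2)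
      = (acc1 ++ (ps.map drawZigzagAlt).map Prod.fst, acc2 ++ (ps.map drawZigzagAlt).map Prod.snd) := by
  induction ps with
  | nil => intro acc1 acc2; simp
  | cons p ps ih =>
    intro acc1 acc2
    simp only [List.foldl_cons, List.map_cons, drawZigzag_eq_alt p, ih]
    simp

-- ===== VERDICT (by name: the statement is the Claim_ definition above) =====
theorem retriangulation_spec : Claim_equal_retriangulation := by
  intro patches _
  unfold Spec_retriangulation retriangulation retriangulation_alt
  rw [retri_loop patches [] []]
  simp
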